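-- pv_equiv track=rewrite | github.com/Monospark/dfly_edit | formatter.py | format_dotify
-- ===== SOURCE A (Python) =====
-- def format_dotify(input_text):
--     new_text = ""
--     words = input_text.split(" ")
--     for word in words:
--         if new_text != "" and new_text[-1:].isalnum() and word[-1:].isalnum():
--             word = "." + word  # Adds dashes between normal words.
--         new_text += word
--     return new_text
-- ===== SOURCE B (Python) =====
-- def format_dotify(input_text):
--     # Group the non-empty words into maximal runs of words ending in an
--     # alphanumeric character; each run is '.'-joined, everything else is
--     # emitted as-is, and the pieces are concatenated.
--     pieces = []
--     run = []  # current run of alnum-ending words, not yet flushed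
--     for word in input_text.split(' '):
--         if not word:
--             continue
--         if word[-1].isalnum():
--             run.append(word)
--         else:
--             if run:
--                 pieces.append('.'.join(run))
--                 run = []
--             pieces.append(word)
--     if run:
--         pieces.append('.'.join(run))
--     return ''.join(pieces)
-- ===== Notes on version B (the rewrite author's own statement) =====
-- stated objective: alternative
-- what changed: Instead of A's single accumulator string whose tail character gates each append, B groups the non-empty words into maximal runs of alnum-ending words, dot-joins each run, and concatenates the resulting pieces (a run-buffer/flush two-level structure).
import Mathlib
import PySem

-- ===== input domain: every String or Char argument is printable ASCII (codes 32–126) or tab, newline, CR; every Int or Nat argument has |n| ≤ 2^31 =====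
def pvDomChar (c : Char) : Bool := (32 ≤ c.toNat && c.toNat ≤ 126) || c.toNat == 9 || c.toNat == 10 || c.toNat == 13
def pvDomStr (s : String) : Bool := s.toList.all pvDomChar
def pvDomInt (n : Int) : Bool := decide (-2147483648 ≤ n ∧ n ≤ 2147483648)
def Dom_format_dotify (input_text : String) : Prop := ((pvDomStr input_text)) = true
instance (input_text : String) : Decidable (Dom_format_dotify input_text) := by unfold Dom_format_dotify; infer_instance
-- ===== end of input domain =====

-- B groups the non-empty words into maximal runs of words ending in an alphanumeric
-- character, '.'-joins each run, and concatenates the pieces, instead of A's single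
-- accumulator whose tail character gates each append (objective: alternative).

-- ===== PORT A =====
-- one iteration of A's loop body: maybe prefix "." to word, then new_text += word
def fdA_step (new_text word : List Char) : List Char :=
  let word :=
    if new_text != [] &&
       PySem.Chars.strIsalnum (PySem.List.slice new_text (some (-1)) none) &&
       PySem.Chars.strIsalnum (PySem.List.slice word (some (-1)) none)
    then '.' :: word else word
  new_text ++ word

def format_dotify (input_text : String) : String :=
  String.ofList ((((PySem.Str.split? input_text " ").getD []).map String.toList).foldl fdA_step [])

-- ===== PORT B =====
-- one iteration of B's loop: state = (pieces, run); empty words are skipped,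
-- alnum-ending words extend the run, others flush the run then stand alone
def fdB_step (st : List (List Char) × List (List Char)) (word : List Char) :
    List (List Char) × List (List Char) :=
  if word = [] then st
  else if (PySem.List.pyGet? word (-1)).elim false PySem.Chars.isalnum then
    (st.1, st.2 ++ [word])
  else
    ((if st.2 ≠ [] then st.1 ++ [PySem.Chars.join ['.'] st.2] else st.1) ++ [word], [])

-- B's trailing 'if run: pieces.append('.'.join(run))'
def fdB_finish (st : List (List Char) × List (List Char)) : List (List Char) :=
  if st.2 ≠ [] then st.1 ++ [PySem.Chars.join ['.'] st.2] else st.1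

def format_dotify_alt (input_text : String) : String :=
  String.ofList (PySem.Chars.join []
    (fdB_finish ((((PySem.Str.split? input_text " ").getD []).map String.toList).foldl fdB_step ([], []))))

-- ===== PRECONDITION & SPEC =====
def Spec_format_dotify (input_text : String) (out : String) : Prop := out = format_dotify_alt input_text
instance (input_text : String) (out : String) : Decidable (Spec_format_dotify input_text out) := by unfold Spec_format_dotify; infer_instance

-- ===== CLAIM (what is proved, stated in full; the proofs are below) =====
def Claim_equal_format_dotify : Prop := ∀ (input_text : String), Dom_format_dotify input_text → Spec_format_dotify input_text (format_dotify input_text)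

-- ===== LEMMAS AND PROOFS =====

-- A's test on the one-char slice s[-1:]
def lastA (w : List Char) : Bool :=
  PySem.Chars.strIsalnum (PySem.List.slice w (some (-1)) none)

-- B's test on the last character w[-1]
def lastB (w : List Char) : Bool :=
  (PySem.List.pyGet? w (-1)).elim false PySem.Chars.isalnum

theorem lastA_nil : lastA [] = false := by
  simp [lastA, PySem.List.slice, PySem.Chars.strIsalnum]

theorem lastA_concat {x : List Char} {a : Char} : lastA (x ++ [a]) = PySem.Chars.isalnum a := by
  simp [lastA, PySem.List.slice_from_neg_one, PySem.Chars.strIsalnum]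

theorem lastB_concat {x : List Char} {a : Char} : lastB (x ++ [a]) = PySem.Chars.isalnum a := by
  simp [lastB, PySem.List.pyGet?_neg_one]

theorem lastA_eq_lastB {w : List Char} (h : w ≠ []) : lastA w = lastB w := by
  obtain ⟨x, a, rfl⟩ := (List.eq_nil_or_concat w).resolve_left h
  rw [List.concat_eq_append, lastA_concat, lastB_concat]

theorem lastA_append {x y : List Char} (h : y ≠ []) : lastA (x ++ y) = lastA y := by
  obtain ⟨z, a, rfl⟩ := (List.eq_nil_or_concat y).resolve_left h
  rw [List.concat_eq_append, ← List.append_assoc, lastA_concat, lastA_concat]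

theorem fdA_step_eq (acc w : List Char) :
    fdA_step acc w = acc ++ (if lastA acc && lastA w then '.' :: w else w) := by
  by_cases h : acc = []
  · subst h; simp [fdA_step, lastA_nil]
  · simp [fdA_step, lastA, h]

-- '.'.join of a run extended on the right
theorem join_snoc (s : List Char) {r : List (List Char)} (h : r ≠ []) (w : List Char) :
    PySem.Chars.join s (r ++ [w]) = PySem.Chars.join s r ++ s ++ w := by
  induction r with
  | nil => exact absurd rfl h
  | cons a r ih =>
    cases r with
    | nil => simp [PySem.Chars.join_cons_cons, PySem.Chars.join_singleton]
    | cons b r =>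
      simp only [List.cons_append, PySem.Chars.join_cons_cons]
      rw [show b :: (r ++ [w]) = (b :: r) ++ [w] from rfl, ih (by simp)]
      simp [List.append_assoc]

-- ''.join is flatten
theorem join_nil_sep (l : List (List Char)) : PySem.Chars.join [] l = l.flatten := by
  induction l with
  | nil => simp [PySem.Chars.join_nil]
  | cons a l ih =>
    cases l with
    | nil => simp [PySem.Chars.join_singleton]
    | cons b l => rw [PySem.Chars.join_cons_cons, ih]; simp

theorem finish_flatten (st : List (List Char) × List (List Char)) :
    (fdB_finish st).flatten = st.1.flatten ++ PySem.Chars.join ['.'] st.2 := by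
  unfold fdB_finish
  by_cases h : st.2 = [] <;> simp [h, PySem.Chars.join_nil]

-- core invariant: A's fold from acc equals B's fold from (pieces, run) rendered,
-- provided acc renders (pieces, run) and acc's tail test tracks run's non-emptiness
theorem foldA_eq_foldB (ws : List (List Char)) :
    ∀ pieces run acc, acc = pieces.flatten ++ PySem.Chars.join ['.'] run →
      (lastA acc = true ↔ run ≠ []) →
      ws.foldl fdA_step acc = (fdB_finish (ws.foldl fdB_step (pieces, run))).flatten := by
  induction ws with
  | nil =>
    intro pieces run acc hacc _
    simp [finish_flatten, hacc]
  | cons w ws ih =>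
    intro pieces run acc hacc hflag
    by_cases hw : w = []
    · subst hw
      have hA : fdA_step acc [] = acc := by
        rw [fdA_step_eq, lastA_nil]; simp
      rw [List.foldl_cons, List.foldl_cons, hA]
      simpa [fdB_step] using ih pieces run acc hacc hflag
    · rw [List.foldl_cons, List.foldl_cons]
      by_cases hb : lastB w = true
      · -- alnum-ending word: B extends the run
        have hB : fdB_step (pieces, run) w = (pieces, run ++ [w]) := by
          simp [fdB_step, hw, lastB] at hb ⊢
          exact hb
        rw [hB]
        apply ih
        · by_cases hr : run = []
          · have hla0 : lastA acc = false := by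
              cases hEq : lastA acc
              · rfl
              · exact absurd (hflag.mp hEq) (by simp [hr])
            rw [fdA_step_eq, hla0]
            simp [hacc, hr, PySem.Chars.join_nil, PySem.Chars.join_singleton]
          · have hla : lastA acc = true := hflag.mpr hr
            rw [fdA_step_eq, hla, lastA_eq_lastB hw, hb, hacc, join_snoc ['.'] hr]
            simp
        · constructor
          · intro _; simp
          · intro _
            rw [fdA_step_eq]
            by_cases hc : (lastA acc && lastA w) = true
            · rw [if_pos hc, lastA_append (show ('.' :: w) ≠ [] by simp),
                show ('.' :: w) = ['.'] ++ w from rfl, lastA_append hw,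
                lastA_eq_lastB hw]
              exact hb
            · rw [if_neg hc, lastA_append hw, lastA_eq_lastB hw]
              exact hb
      · -- non-alnum-ending word: B flushes the run and emits the word alone
        have hb' : lastB w = false := by
          cases hEq : lastB w
          · rfl
          · exact absurd hEq hb
        have hB : fdB_step (pieces, run) w =
            ((if run ≠ [] then pieces ++ [PySem.Chars.join ['.'] run] else pieces) ++ [w], []) := by
          simp [fdB_step, hw, lastB] at hb' ⊢
          exact hb'
        rw [hB]
        have hcond : (lastA acc && lastA w) = false := by
          rw [lastA_eq_lastB hw, hb']; simp
        have hA : fdA_step acc w = acc ++ w := by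
          rw [fdA_step_eq, hcond]; simp
        apply ih
        · rw [hA, hacc]
          by_cases hr : run = [] <;>
            simp [hr, PySem.Chars.join_nil]
        · have hlast : lastA (fdA_step acc w) = false := by
            rw [hA, lastA_append hw, lastA_eq_lastB hw]; exact hb'
          simp [hlast]

-- ===== VERDICT (by name: the statement is the Claim_ definition above) =====
theorem format_dotify_spec : Claim_equal_format_dotify := by
  intro input_text _
  unfold Spec_format_dotify format_dotify format_dotify_alt
  rw [join_nil_sep,
    foldA_eq_foldB _ [] [] [] (by simp [PySem.Chars.join_nil]) (by simp [lastA_nil])]
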